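-- pv_equiv track=rewrite | github.com/yumble/python_practice | level3/backjun20529.py | mbti_distance
-- ===== SOURCE A (Python) =====
-- from itertools import combinations
--
-- def mbti_distance(n, mbti):
--     min_distance = 100
--     if n > 32:
--         return 0
--     for i, j, k in combinations(mbti, 3):
--         cnt = 0
--         for m in range(4):
--             if i[m] != j[m]:
--                 cnt += 1
--             if j[m] != k[m]:
--                 cnt += 1
--             if k[m] != i[m]:
--                 cnt += 1
--         if min_distance > cnt:
--             min_distance = cnt
--     return min_distance
-- ===== SOURCE B (Python) =====
-- from itertools import combinations
--
-- def mbti_distance(n, mbti):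
--     if n > 32:
--         return 0
--     prefixes = [s[:4] for s in mbti]
--     counts = {}
--     for p in prefixes:
--         counts[p] = counts.get(p, 0) + 1
--     keys = list(dict.fromkeys(prefixes))
--
--     def d(a, b):
--         return sum(1 for m in range(4) if a[m] != b[m])
--
--     cands = []
--     if any(counts.get(a, 0) >= 3 for a in keys):
--         cands.append(0)
--     for a, b in combinations(keys, 2):
--         if counts.get(a, 0) >= 2 or counts.get(b, 0) >= 2:
--             cands.append(2 * d(a, b))
--     for a, b, c in combinations(keys, 3):
--         cands.append(d(a, b) + d(b, c) + d(a, c))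
--     best = 100
--     for v in cands:
--         best = min(best, v)
--     return best
-- ===== Notes on version B (the rewrite author's own statement) =====
-- stated objective: alternative
-- what changed: B replaces A's brute-force scan of all C(n,3) element triples by a counting algorithm: it tallies how often each 4-char type prefix occurs, then minimizes over three feasible configurations on DISTINCT types only (a type with count>=3 gives 0, a type with count>=2 paired with another type gives 2*d, and triples of distinct types give d(a,b)+d(b,c)+d(a,c)).
import Mathlib
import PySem

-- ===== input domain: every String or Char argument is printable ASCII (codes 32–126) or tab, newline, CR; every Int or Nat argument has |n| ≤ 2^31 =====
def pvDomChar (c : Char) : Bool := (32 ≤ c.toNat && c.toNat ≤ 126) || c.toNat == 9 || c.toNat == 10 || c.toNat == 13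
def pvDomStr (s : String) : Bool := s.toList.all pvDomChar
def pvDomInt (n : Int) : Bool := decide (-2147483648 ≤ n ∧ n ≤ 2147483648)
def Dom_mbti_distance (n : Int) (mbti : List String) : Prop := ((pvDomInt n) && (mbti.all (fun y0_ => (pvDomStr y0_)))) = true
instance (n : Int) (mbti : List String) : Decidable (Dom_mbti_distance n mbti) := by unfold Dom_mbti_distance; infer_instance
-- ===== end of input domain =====

-- B replaces A's scan of all element triples by counting occurrences of each 4-char prefix
-- and minimizing over configurations of DISTINCT prefixes only (objective: alternative algorithm).

-- ===== PORT A =====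
-- i[m] for the strings A indexes; exact for m < length, which Pre_ guarantees wherever A evaluates it
def pvCharAt (s : String) (m : Nat) : Char := s.toList.getD m ' '

-- the inner 'for m in range(4)' loop of A
def pvCntA (i j k : String) : Int :=
  (List.range 4).foldl (fun cnt m =>
    let c1 := if pvCharAt i m ≠ pvCharAt j m then cnt + 1 else cnt
    let c2 := if pvCharAt j m ≠ pvCharAt k m then c1 + 1 else c1
    if pvCharAt k m ≠ pvCharAt i m then c2 + 1 else c2) 0

def mbti_distance (n : Int) (mbti : List String) : Int :=
  if n > 32 then 0
  else
    (PySem.List.combinations mbti 3).foldl (fun md c =>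
      match c with
      | [i, j, k] =>
        let cnt := pvCntA i j k
        if md > cnt then cnt else md
      | _ => md) 100

-- ===== PORT B =====
-- s[:4]
def pvKey (s : String) : List Char := s.toList.take 4

-- d(a, b) = sum(1 for m in range(4) if a[m] != b[m]); exact for keys of length ≥ 4 (Pre_)
def pvD (a b : List Char) : Int := ((List.range 4).countP (fun m => a.getD m ' ' != b.getD m ' ') : Int)

-- the tuple (a, b) from combinations(keys, 2), read by position
def pvPairCond (counts : PySem.Dict (List Char) Int) (c : List (List Char)) : Bool :=
  decide (2 ≤ counts.getD (c.getD 0 []) 0) || decide (2 ≤ counts.getD (c.getD 1 []) 0)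

def pvPairVal (c : List (List Char)) : Int := 2 * pvD (c.getD 0 []) (c.getD 1 [])

-- the tuple (a, b, c) from combinations(keys, 3), read by position
def pvTripVal (c : List (List Char)) : Int :=
  pvD (c.getD 0 []) (c.getD 1 []) + pvD (c.getD 1 []) (c.getD 2 [])
    + pvD (c.getD 0 []) (c.getD 2 [])

def mbti_distance_alt (n : Int) (mbti : List String) : Int :=
  if n > 32 then 0
  else
    let prefixes := mbti.map pvKey
    let counts := prefixes.foldl (fun d p => d.modify p 0 (· + 1)) PySem.Dict.empty
    let keys := PySem.List.dedup prefixes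
    let cands0 : List Int := if keys.any (fun a => decide (3 ≤ counts.getD a 0)) then [0] else []
    let cands1 := (PySem.List.combinations keys 2).foldl
      (fun acc c => if pvPairCond counts c then acc ++ [pvPairVal c] else acc) cands0
    let cands2 := (PySem.List.combinations keys 3).foldl
      (fun acc c => acc ++ [pvTripVal c]) cands1
    cands2.foldl (fun best v => min best v) 100

-- ===== PRECONDITION & SPEC =====
-- Pre_ excludes exactly the inputs on which A raises IndexError: at least three strings present
-- (so the triple loop runs) while some string is shorter than 4 characters.
def Pre_mbti_distance (n : Int) (mbti : List String) : Prop :=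
  32 < n ∨ mbti.length < 3 ∨ ∀ s ∈ mbti, 4 ≤ s.toList.length

instance (n : Int) (mbti : List String) : Decidable (Pre_mbti_distance n mbti) := by
  unfold Pre_mbti_distance; infer_instance

def pvWitness_mbti_distance : Int × List String := (3, ["INTJ", "ENFP", "INTP"])

def Spec_mbti_distance (n : Int) (mbti : List String) (out : Int) : Prop := out = mbti_distance_alt n mbti
instance (n : Int) (mbti : List String) (out : Int) : Decidable (Spec_mbti_distance n mbti out) := by
  unfold Spec_mbti_distance; infer_instance

-- ===== CLAIM (what is proved, stated in full; the proofs are below) =====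
def Claim_equal_mbti_distance : Prop := ∀ (n : Int) (mbti : List String), Dom_mbti_distance n mbti → Pre_mbti_distance n mbti → Spec_mbti_distance n mbti (mbti_distance n mbti)

-- ===== LEMMAS AND PROOFS =====

-- the value A's outer loop associates to a triple
def pvAVal (c : List String) : Int :=
  match c with
  | [i, j, k] => pvCntA i j k
  | _ => 0

-- the triple distance expressed on keys (sum of the three unordered pair distances)
def pvS (a b c : List Char) : Int := pvD a b + pvD b c + pvD a c

-- how often key a occurs among the prefixes of l
def pvCnt (a : List Char) (l : List String) : Nat := l.countP (fun s => pvKey s == a)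

-- the count dictionary B builds
def pvCounts (mbti : List String) : PySem.Dict (List Char) Int :=
  (mbti.map pvKey).foldl (fun d p => d.modify p 0 (· + 1)) PySem.Dict.empty

-- the candidate list B builds (definitionally the let-chain inside mbti_distance_alt)
def pvCands (mbti : List String) : List Int :=
  let counts := pvCounts mbti
  let keys := PySem.List.dedup (mbti.map pvKey)
  let cands0 : List Int := if keys.any (fun a => decide (3 ≤ counts.getD a 0)) then [0] else []
  let cands1 := (PySem.List.combinations keys 2).foldl
    (fun acc c => if pvPairCond counts c then acc ++ [pvPairVal c] else acc) cands0
  (PySem.List.combinations keys 3).foldl (fun acc c => acc ++ [pvTripVal c]) cands1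

theorem pvD_symm (a b : List Char) : pvD a b = pvD b a := by
  unfold pvD
  congr 1
  apply List.countP_congr
  intro m _
  rw [bne_comm]

theorem pvD_self (a : List Char) : pvD a a = 0 := by
  unfold pvD
  rw [List.countP_eq_zero.2]
  · rfl
  · intro m _; simp

theorem foldl_min_eq_of (a : Int) (l1 l2 : List Int)
    (h1 : ∀ v ∈ l1, ∃ w ∈ l2, w ≤ v) (h2 : ∀ w ∈ l2, ∃ v ∈ l1, v ≤ w) :
    l1.foldl min a = l2.foldl min a := by
  apply le_antisymm
  · rcases PySem.List.foldl_min_mem l2 a with h | h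
    · rw [h]; exact (PySem.List.foldl_min_le l1 a).1
    · obtain ⟨v, hv, hvle⟩ := h2 _ h
      exact le_trans ((PySem.List.foldl_min_le l1 a).2 v hv) hvle
  · rcases PySem.List.foldl_min_mem l1 a with h | h
    · rw [h]; exact (PySem.List.foldl_min_le l2 a).1
    · obtain ⟨w, hw, hwle⟩ := h1 _ h
      exact le_trans ((PySem.List.foldl_min_le l2 a).2 w hw) hwle

-- counts.getD a 0 is the number of occurrences of key a
theorem pvCounts_getD (l : List String) (a : List Char) :
    (pvCounts l).getD a 0 = (pvCnt a l : Int) := by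
  unfold pvCounts
  rw [PySem.Dict.getD_foldl_modify_add_one]
  simp [pvCnt, List.count, List.countP_map, Function.comp_def]

theorem pvCnt_cons (a : List Char) (s : String) (l : List String) :
    pvCnt a (s :: l) = pvCnt a l + if pvKey s = a then 1 else 0 := by
  simp [pvCnt, List.countP_cons]

theorem pvCnt_pos_of_mem {a : List Char} {l : List String} (h : a ∈ l.map pvKey) :
    1 ≤ pvCnt a l := by
  obtain ⟨s, hs, rfl⟩ := List.mem_map.1 h
  exact Nat.succ_le_of_lt (List.countP_pos_iff.2 ⟨s, hs, by simp⟩)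

-- characters of the key agree with the characters A reads, for strings of length ≥ 4
theorem pvKey_getD (s : String) (hs : 4 ≤ s.toList.length) (m : Nat) (hm : m < 4) :
    (pvKey s).getD m ' ' = pvCharAt s m := by
  unfold pvKey pvCharAt
  rw [List.getD_eq_getElem?_getD, List.getD_eq_getElem?_getD, List.getElem?_take_of_lt hm]

theorem pvSumIte (p : Nat → Prop) [DecidablePred p] (l : List Nat) :
    (l.map (fun x => if p x then (1 : Int) else 0)).sum = (l.countP (fun x => decide (p x)) : Int) := by
  induction l with
  | nil => rfl
  | cons x t ih =>
    by_cases hx : p x <;> simp [hx, ih] <;> omega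

theorem pvCntA_eq_S (i j k : String)
    (hi : 4 ≤ i.toList.length) (hj : 4 ≤ j.toList.length) (hk : 4 ≤ k.toList.length) :
    pvCntA i j k = pvS (pvKey i) (pvKey j) (pvKey k) := by
  have hd : ∀ (s t : String), 4 ≤ s.toList.length → 4 ≤ t.toList.length →
      pvD (pvKey s) (pvKey t) =
        ((List.range 4).countP (fun m => decide (pvCharAt s m ≠ pvCharAt t m)) : Int) := by
    intro s t hs ht
    unfold pvD
    congr 1
    apply List.countP_congr
    intro m hm
    rw [List.mem_range] at hm
    rw [pvKey_getD s hs m hm, pvKey_getD t ht m hm]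
    simp [bne]
  have hstep : (fun (cnt : Int) m =>
      let c1 := if pvCharAt i m ≠ pvCharAt j m then cnt + 1 else cnt
      let c2 := if pvCharAt j m ≠ pvCharAt k m then c1 + 1 else c1
      if pvCharAt k m ≠ pvCharAt i m then c2 + 1 else c2)
      = fun (cnt : Int) m => cnt +
        ((if pvCharAt i m ≠ pvCharAt j m then (1 : Int) else 0) +
         ((if pvCharAt j m ≠ pvCharAt k m then (1 : Int) else 0) +
          (if pvCharAt k m ≠ pvCharAt i m then (1 : Int) else 0))) := by
    funext cnt m
    dsimp only
    split_ifs <;> ring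
  have hflip : (List.range 4).countP (fun m => decide (pvCharAt k m ≠ pvCharAt i m))
      = (List.range 4).countP (fun m => decide (pvCharAt i m ≠ pvCharAt k m)) := by
    apply List.countP_congr
    intro m _
    simp [ne_comm]
  unfold pvCntA pvS
  rw [hstep, PySem.List.foldl_add, PySem.List.sum_map_add_int, PySem.List.sum_map_add_int,
    pvSumIte, pvSumIte, pvSumIte, hflip, hd i j hi hj, hd j k hj hk, hd i k hi hk]
  ring

-- ===== existence of triples inside mbti from key counts =====

theorem pvE1 (l : List String) (a : List Char) (h : 1 ≤ pvCnt a l) :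
    ∃ x, List.Sublist [x] l ∧ pvKey x = a := by
  obtain ⟨x, hx, hxa⟩ := List.countP_pos_iff.1 (Nat.lt_of_lt_of_le Nat.zero_lt_one h)
  exact ⟨x, List.singleton_sublist.2 hx, by simpa using hxa⟩

theorem pvE2aa (l : List String) (a : List Char) (h : 2 ≤ pvCnt a l) :
    ∃ x y, List.Sublist [x, y] l ∧ pvKey x = a ∧ pvKey y = a := by
  induction l with
  | nil => simp [pvCnt] at h
  | cons s t ih =>
    rw [pvCnt_cons] at h
    by_cases hs : pvKey s = a
    · rw [if_pos hs] at h
      obtain ⟨y, hy, hya⟩ := pvE1 t a (by omega)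
      exact ⟨s, y, List.Sublist.cons₂ s hy, hs, hya⟩
    · rw [if_neg hs] at h
      obtain ⟨x, y, hxy, hx, hy⟩ := ih (by omega)
      exact ⟨x, y, List.Sublist.cons s hxy, hx, hy⟩

theorem pvE2ab (l : List String) (a b : List Char) (hne : a ≠ b)
    (ha : 1 ≤ pvCnt a l) (hb : 1 ≤ pvCnt b l) :
    ∃ x y, List.Sublist [x, y] l ∧ ((pvKey x = a ∧ pvKey y = b) ∨ (pvKey x = b ∧ pvKey y = a)) := by
  induction l with
  | nil => simp [pvCnt] at ha
  | cons s t ih =>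
    rw [pvCnt_cons] at ha hb
    by_cases hsa : pvKey s = a
    · rw [if_neg (by rw [hsa]; exact hne)] at hb
      obtain ⟨y, hy, hyb⟩ := pvE1 t b (by omega)
      exact ⟨s, y, List.Sublist.cons₂ s hy, Or.inl ⟨hsa, hyb⟩⟩
    · by_cases hsb : pvKey s = b
      · rw [if_neg hsa] at ha
        obtain ⟨y, hy, hya⟩ := pvE1 t a (by omega)
        exact ⟨s, y, List.Sublist.cons₂ s hy, Or.inr ⟨hsb, hya⟩⟩
      · rw [if_neg hsa] at ha; rw [if_neg hsb] at hb
        obtain ⟨x, y, hxy, hp⟩ := ih ha hb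
        exact ⟨x, y, List.Sublist.cons s hxy, hp⟩

theorem pvE3aaa (l : List String) (a : List Char) (h : 3 ≤ pvCnt a l) :
    ∃ x y z, List.Sublist [x, y, z] l ∧ pvS (pvKey x) (pvKey y) (pvKey z) = 0 := by
  induction l with
  | nil => simp [pvCnt] at h
  | cons s t ih =>
    rw [pvCnt_cons] at h
    by_cases hs : pvKey s = a
    · rw [if_pos hs] at h
      obtain ⟨x, y, hxy, hx, hy⟩ := pvE2aa t a (by omega)
      exact ⟨s, x, y, List.Sublist.cons₂ s hxy, by simp [pvS, hs, hx, hy, pvD_self]⟩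
    · rw [if_neg hs] at h
      obtain ⟨x, y, z, hxyz, hval⟩ := ih (by omega)
      exact ⟨x, y, z, List.Sublist.cons s hxyz, hval⟩

theorem pvE3aab (l : List String) (a b : List Char) (hne : a ≠ b)
    (ha : 2 ≤ pvCnt a l) (hb : 1 ≤ pvCnt b l) :
    ∃ x y z, List.Sublist [x, y, z] l ∧ pvS (pvKey x) (pvKey y) (pvKey z) = 2 * pvD a b := by
  induction l with
  | nil => simp [pvCnt] at ha
  | cons s t ih =>
    rw [pvCnt_cons] at ha hb
    by_cases hsa : pvKey s = a
    · rw [if_pos hsa] at ha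
      rw [if_neg (by rw [hsa]; exact hne)] at hb
      obtain ⟨x, y, hxy, hp⟩ := pvE2ab t a b hne (by omega) hb
      refine ⟨s, x, y, List.Sublist.cons₂ s hxy, ?_⟩
      rcases hp with ⟨hx, hy⟩ | ⟨hx, hy⟩ <;>
        · simp only [pvS, hsa, hx, hy, pvD_self, pvD_symm b a]; try ring
    · by_cases hsb : pvKey s = b
      · rw [if_neg hsa] at ha
        obtain ⟨x, y, hxy, hx, hy⟩ := pvE2aa t a (by omega)
        refine ⟨s, x, y, List.Sublist.cons₂ s hxy, ?_⟩
        simp only [pvS, hsb, hx, hy, pvD_self, pvD_symm b a]; try ring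
      · rw [if_neg hsa] at ha; rw [if_neg hsb] at hb
        obtain ⟨x, y, z, hxyz, hval⟩ := ih ha hb
        exact ⟨x, y, z, List.Sublist.cons s hxyz, hval⟩

theorem pvE3abc (l : List String) (a b c : List Char)
    (hab : a ≠ b) (hac : a ≠ c) (hbc : b ≠ c)
    (ha : 1 ≤ pvCnt a l) (hb : 1 ≤ pvCnt b l) (hc : 1 ≤ pvCnt c l) :
    ∃ x y z, List.Sublist [x, y, z] l ∧ pvS (pvKey x) (pvKey y) (pvKey z) = pvS a b c := by
  induction l with
  | nil => simp [pvCnt] at ha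
  | cons s t ih =>
    rw [pvCnt_cons] at ha hb hc
    by_cases hsa : pvKey s = a
    · rw [if_neg (by rw [hsa]; exact hab)] at hb
      rw [if_neg (by rw [hsa]; exact hac)] at hc
      obtain ⟨x, y, hxy, hp⟩ := pvE2ab t b c hbc hb hc
      refine ⟨s, x, y, List.Sublist.cons₂ s hxy, ?_⟩
      rcases hp with ⟨hx, hy⟩ | ⟨hx, hy⟩ <;>
        · simp only [pvS, hsa, hx, hy, pvD_symm b a, pvD_symm c a, pvD_symm c b]; try ring
    · by_cases hsb : pvKey s = b
      · rw [if_neg hsa] at ha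
        rw [if_neg (by rw [hsb]; exact hbc)] at hc
        obtain ⟨x, y, hxy, hp⟩ := pvE2ab t a c hac ha hc
        refine ⟨s, x, y, List.Sublist.cons₂ s hxy, ?_⟩
        rcases hp with ⟨hx, hy⟩ | ⟨hx, hy⟩ <;>
          · simp only [pvS, hsb, hx, hy, pvD_symm b a, pvD_symm c a, pvD_symm c b]; try ring
      · by_cases hsc : pvKey s = c
        · rw [if_neg hsa] at ha; rw [if_neg hsb] at hb
          obtain ⟨x, y, hxy, hp⟩ := pvE2ab t a b hab ha hb
          refine ⟨s, x, y, List.Sublist.cons₂ s hxy, ?_⟩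
          rcases hp with ⟨hx, hy⟩ | ⟨hx, hy⟩ <;>
            · simp only [pvS, hsc, hx, hy, pvD_symm b a, pvD_symm c a, pvD_symm c b]; try ring
        · rw [if_neg hsa] at ha; rw [if_neg hsb] at hb; rw [if_neg hsc] at hc
          obtain ⟨x, y, z, hxyz, hval⟩ := ih ha hb hc
          exact ⟨x, y, z, List.Sublist.cons s hxyz, hval⟩

-- ===== picking ordered sublists out of the key list =====

theorem pvP2 {α : Type} [DecidableEq α] (l : List α) (a b : α)
    (haM : a ∈ l) (hbM : b ∈ l) (hne : a ≠ b) :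
    ∃ x y, List.Sublist [x, y] l ∧ ((x = a ∧ y = b) ∨ (x = b ∧ y = a)) := by
  induction l with
  | nil => simp at haM
  | cons h t ih =>
    by_cases hha : h = a
    · have hbt : b ∈ t := by
        rcases List.mem_cons.1 hbM with h1 | h1
        · exact absurd (h1.trans hha) hne.symm
        · exact h1
      exact ⟨a, b, by rw [← hha]; exact List.Sublist.cons₂ h (List.singleton_sublist.2 hbt),
        Or.inl ⟨rfl, rfl⟩⟩
    · by_cases hhb : h = b
      · have hat : a ∈ t := by
          rcases List.mem_cons.1 haM with h1 | h1
          · exact absurd (h1.trans hhb) hne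
          · exact h1
        exact ⟨b, a, by rw [← hhb]; exact List.Sublist.cons₂ h (List.singleton_sublist.2 hat),
          Or.inr ⟨rfl, rfl⟩⟩
      · have hat : a ∈ t := by
          rcases List.mem_cons.1 haM with h1 | h1
          · exact absurd h1.symm hha
          · exact h1
        have hbt : b ∈ t := by
          rcases List.mem_cons.1 hbM with h1 | h1
          · exact absurd h1.symm hhb
          · exact h1
        obtain ⟨x, y, hxy, hp⟩ := ih hat hbt
        exact ⟨x, y, List.Sublist.cons h hxy, hp⟩

theorem pvP3 (l : List (List Char)) (a b c : List Char)
    (haM : a ∈ l) (hbM : b ∈ l) (hcM : c ∈ l)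
    (hab : a ≠ b) (hac : a ≠ c) (hbc : b ≠ c) :
    ∃ x y z, List.Sublist [x, y, z] l ∧ pvS x y z = pvS a b c := by
  induction l with
  | nil => simp at haM
  | cons h t ih =>
    by_cases hha : h = a
    · have hbt : b ∈ t := by
        rcases List.mem_cons.1 hbM with h1 | h1
        · exact absurd (h1.trans hha).symm hab
        · exact h1
      have hct : c ∈ t := by
        rcases List.mem_cons.1 hcM with h1 | h1
        · exact absurd (h1.trans hha).symm hac
        · exact h1
      obtain ⟨x, y, hxy, hp⟩ := pvP2 t b c hbt hct hbc
      refine ⟨h, x, y, List.Sublist.cons₂ h hxy, ?_⟩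
      rcases hp with ⟨hx, hy⟩ | ⟨hx, hy⟩ <;>
        · simp only [pvS, hha, hx, hy, pvD_symm b a, pvD_symm c a, pvD_symm c b]; try ring
    · by_cases hhb : h = b
      · have hat : a ∈ t := by
          rcases List.mem_cons.1 haM with h1 | h1
          · exact absurd (h1.trans hhb) hab
          · exact h1
        have hct : c ∈ t := by
          rcases List.mem_cons.1 hcM with h1 | h1
          · exact absurd (h1.trans hhb).symm hbc
          · exact h1
        obtain ⟨x, y, hxy, hp⟩ := pvP2 t a c hat hct hac
        refine ⟨h, x, y, List.Sublist.cons₂ h hxy, ?_⟩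
        rcases hp with ⟨hx, hy⟩ | ⟨hx, hy⟩ <;>
          · simp only [pvS, hhb, hx, hy, pvD_symm b a, pvD_symm c a, pvD_symm c b]; try ring
      · by_cases hhc : h = c
        · have hat : a ∈ t := by
            rcases List.mem_cons.1 haM with h1 | h1
            · exact absurd (h1.trans hhc) hac
            · exact h1
          have hbt : b ∈ t := by
            rcases List.mem_cons.1 hbM with h1 | h1
            · exact absurd (h1.trans hhc) hbc
            · exact h1
          obtain ⟨x, y, hxy, hp⟩ := pvP2 t a b hat hbt hab
          refine ⟨h, x, y, List.Sublist.cons₂ h hxy, ?_⟩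
          rcases hp with ⟨hx, hy⟩ | ⟨hx, hy⟩ <;>
            · simp only [pvS, hhc, hx, hy, pvD_symm b a, pvD_symm c a, pvD_symm c b]; try ring
        · have hat : a ∈ t := by
            rcases List.mem_cons.1 haM with h1 | h1
            · exact absurd h1.symm hha
            · exact h1
          have hbt : b ∈ t := by
            rcases List.mem_cons.1 hbM with h1 | h1
            · exact absurd h1.symm hhb
            · exact h1
          have hct : c ∈ t := by
            rcases List.mem_cons.1 hcM with h1 | h1
            · exact absurd h1.symm hhc
            · exact h1
          obtain ⟨x, y, z, hxyz, hval⟩ := ih hat hbt hct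
          exact ⟨x, y, z, List.Sublist.cons h hxyz, hval⟩

-- ===== the candidate list, unfolded =====

theorem pvCands_eq (mbti : List String) :
    pvCands mbti =
      (if (PySem.List.dedup (mbti.map pvKey)).any
            (fun a => decide (3 ≤ (pvCnt a mbti : Int))) then [(0 : Int)] else [])
      ++ ((PySem.List.combinations (PySem.List.dedup (mbti.map pvKey)) 2).filter
            (pvPairCond (pvCounts mbti))).map pvPairVal
      ++ (PySem.List.combinations (PySem.List.dedup (mbti.map pvKey)) 3).map pvTripVal := by
  unfold pvCands
  rw [PySem.List.foldl_append_singleton_eq_map, PySem.List.foldl_append_if]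
  have hany : ((PySem.List.dedup (mbti.map pvKey)).any (fun a =>
      decide (3 ≤ (pvCounts mbti).getD a 0)))
      = ((PySem.List.dedup (mbti.map pvKey)).any (fun a => decide (3 ≤ (pvCnt a mbti : Int)))) := by
    apply PySem.List.any_congr_mem
    intro a _
    rw [pvCounts_getD]
  rw [hany]

-- the two-key condition of a pair candidate, stated on counts
theorem pvPairCond_iff (mbti : List String) (a b : List Char) :
    pvPairCond (pvCounts mbti) [a, b] = true ↔ (2 ≤ pvCnt a mbti ∨ 2 ≤ pvCnt b mbti) := by
  unfold pvPairCond
  simp only [List.getD_cons_zero, List.getD_cons_succ]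
  rw [Bool.or_eq_true, decide_eq_true_iff, decide_eq_true_iff, pvCounts_getD, pvCounts_getD]
  omega

theorem pvCandToTriple (mbti : List String) :
    ∀ v ∈ pvCands mbti, ∃ x y z, List.Sublist [x, y, z] mbti ∧
      pvS (pvKey x) (pvKey y) (pvKey z) = v := by
  intro v hv
  rw [pvCands_eq] at hv
  have hnd : (PySem.List.dedup (mbti.map pvKey)).Nodup := PySem.List.nodup_dedup _
  rcases List.mem_append.1 hv with hv' | htrip
  · rcases List.mem_append.1 hv' with h0 | hpair
    · -- the 0 candidate
      split at h0
      case isFalse => simp at h0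
      case isTrue hcond =>
        have hv0 : v = 0 := by simpa using h0
        obtain ⟨a, haK, hc3⟩ := List.any_eq_true.1 hcond
        rw [decide_eq_true_iff] at hc3
        obtain ⟨x, y, z, hsub, hval⟩ := pvE3aaa mbti a (by exact_mod_cast hc3)
        exact ⟨x, y, z, hsub, by rw [hval, hv0]⟩
    · -- a pair candidate
      obtain ⟨c, hcmem, rfl⟩ := List.mem_map.1 hpair
      obtain ⟨hc2, hcond⟩ := List.mem_filter.1 hcmem
      obtain ⟨hsub, hlen⟩ := (PySem.List.mem_combinations_iff _ _ _).1 hc2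
      rcases c with _ | ⟨a, c⟩
      · simp at hlen
      rcases c with _ | ⟨b, c⟩
      · simp at hlen
      rcases c with _ | ⟨d, c⟩
      · have hne : a ≠ b := by
          have := hnd.sublist hsub
          simp at this
          exact this
        have haM : a ∈ mbti.map pvKey :=
          PySem.List.mem_dedup _ _ |>.1 (hsub.subset (by simp))
        have hbM : b ∈ mbti.map pvKey :=
          PySem.List.mem_dedup _ _ |>.1 (hsub.subset (by simp))
        rcases (pvPairCond_iff mbti a b).1 hcond with h2a | h2b
        · obtain ⟨x, y, z, hs, hval⟩ := pvE3aab mbti a b hne h2a (pvCnt_pos_of_mem hbM)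
          exact ⟨x, y, z, hs, by rw [hval]; rfl⟩
        · obtain ⟨x, y, z, hs, hval⟩ := pvE3aab mbti b a hne.symm h2b (pvCnt_pos_of_mem haM)
          refine ⟨x, y, z, hs, ?_⟩
          rw [hval, pvD_symm b a]
          rfl
      · simp only [List.length_cons] at hlen; omega
  · -- a triple candidate
    obtain ⟨c, hcmem, rfl⟩ := List.mem_map.1 htrip
    obtain ⟨hsub, hlen⟩ := (PySem.List.mem_combinations_iff _ _ _).1 hcmem
    rcases c with _ | ⟨a, c⟩
    · simp at hlen
    rcases c with _ | ⟨b, c⟩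
    · simp at hlen
    rcases c with _ | ⟨cc, c⟩
    · simp at hlen
    rcases c with _ | ⟨d, c⟩
    · have hnd3 : ([a, b, cc] : List (List Char)).Nodup := hnd.sublist hsub
      have hab : a ≠ b := by simp at hnd3; tauto
      have hac : a ≠ cc := by simp at hnd3; tauto
      have hbc : b ≠ cc := by simp at hnd3; tauto
      have haM := PySem.List.mem_dedup _ _ |>.1 (hsub.subset (show a ∈ [a, b, cc] by simp))
      have hbM := PySem.List.mem_dedup _ _ |>.1 (hsub.subset (show b ∈ [a, b, cc] by simp))
      have hcM := PySem.List.mem_dedup _ _ |>.1 (hsub.subset (show cc ∈ [a, b, cc] by simp))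
      obtain ⟨x, y, z, hs, hval⟩ := pvE3abc mbti a b cc hab hac hbc
        (pvCnt_pos_of_mem haM) (pvCnt_pos_of_mem hbM) (pvCnt_pos_of_mem hcM)
      exact ⟨x, y, z, hs, by rw [hval]; rfl⟩
    · simp only [List.length_cons] at hlen; omega

theorem pvTripleToCand (mbti : List String) :
    ∀ x y z, List.Sublist [x, y, z] mbti →
      ∃ w ∈ pvCands mbti, w = pvS (pvKey x) (pvKey y) (pvKey z) := by
  intro x y z hsub
  rw [pvCands_eq]
  have hsubK : List.Sublist [pvKey x, pvKey y, pvKey z] (mbti.map pvKey) := by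
    simpa using hsub.map pvKey
  have hxM : pvKey x ∈ PySem.List.dedup (mbti.map pvKey) :=
    (PySem.List.mem_dedup _ _).2 (hsubK.subset (by simp))
  have hyM : pvKey y ∈ PySem.List.dedup (mbti.map pvKey) :=
    (PySem.List.mem_dedup _ _).2 (hsubK.subset (by simp))
  have hzM : pvKey z ∈ PySem.List.dedup (mbti.map pvKey) :=
    (PySem.List.mem_dedup _ _).2 (hsubK.subset (by simp))
  -- counting keys along the chosen triple
  have hcnt : ∀ a : List Char, ([x, y, z].countP (fun s => pvKey s == a)) ≤ pvCnt a mbti :=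
    fun a => hsub.countP_le
  by_cases hxy : pvKey x = pvKey y
  · by_cases hxz : pvKey x = pvKey z
    · -- all three keys equal: the 0 candidate is present
      have h3 : 3 ≤ pvCnt (pvKey x) mbti := by
        have := hcnt (pvKey x)
        simp [List.countP_cons, hxy.symm, hxz.symm] at this
        omega
      have hcond : (PySem.List.dedup (mbti.map pvKey)).any
          (fun a => decide (3 ≤ (pvCnt a mbti : Int))) = true :=
        List.any_eq_true.2 ⟨pvKey x, hxM, by rw [decide_eq_true_iff]; exact_mod_cast h3⟩
      refine ⟨0, List.mem_append.2 (Or.inl (List.mem_append.2 (Or.inl ?_))), ?_⟩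
      · rw [if_pos hcond]; simp
      · rw [← hxy, ← hxz, pvS]
        rw [pvD_self]
        ring
    · -- keys x = y ≠ z : pair candidate (key x doubled, key z)
      have h2 : 2 ≤ pvCnt (pvKey x) mbti := by
        have := hcnt (pvKey x)
        simp [List.countP_cons, hxy.symm] at this
        omega
      obtain ⟨p, q, hpq, hor⟩ := pvP2 _ (pvKey x) (pvKey z) hxM hzM hxz
      have hpqm : [p, q] ∈ PySem.List.combinations (PySem.List.dedup (mbti.map pvKey)) 2 :=
        (PySem.List.mem_combinations_iff _ _ _).2 ⟨hpq, rfl⟩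
      have hcond : pvPairCond (pvCounts mbti) [p, q] = true := by
        rw [pvPairCond_iff]
        rcases hor with ⟨rfl, rfl⟩ | ⟨rfl, rfl⟩
        · exact Or.inl h2
        · exact Or.inr h2
      refine ⟨pvPairVal [p, q], List.mem_append.2 (Or.inl (List.mem_append.2 (Or.inr ?_))), ?_⟩
      · exact List.mem_map_of_mem (List.mem_filter.2 ⟨hpqm, hcond⟩)
      · rcases hor with ⟨rfl, rfl⟩ | ⟨rfl, rfl⟩
        · show 2 * pvD (pvKey x) (pvKey z) = _
          rw [pvS, ← hxy, pvD_self]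
          ring
        · show 2 * pvD (pvKey z) (pvKey x) = _
          rw [pvS, ← hxy, pvD_self, pvD_symm (pvKey z) (pvKey x)]
          ring
  · by_cases hyz : pvKey y = pvKey z
    · -- keys y = z ≠ x : pair candidate (key y doubled, key x)
      have h2 : 2 ≤ pvCnt (pvKey y) mbti := by
        have := hcnt (pvKey y)
        simp [List.countP_cons, hyz.symm] at this
        omega
      obtain ⟨p, q, hpq, hor⟩ := pvP2 _ (pvKey x) (pvKey y) hxM hyM hxy
      have hpqm : [p, q] ∈ PySem.List.combinations (PySem.List.dedup (mbti.map pvKey)) 2 :=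
        (PySem.List.mem_combinations_iff _ _ _).2 ⟨hpq, rfl⟩
      have hcond : pvPairCond (pvCounts mbti) [p, q] = true := by
        rw [pvPairCond_iff]
        rcases hor with ⟨rfl, rfl⟩ | ⟨rfl, rfl⟩
        · exact Or.inr h2
        · exact Or.inl h2
      refine ⟨pvPairVal [p, q], List.mem_append.2 (Or.inl (List.mem_append.2 (Or.inr ?_))), ?_⟩
      · exact List.mem_map_of_mem (List.mem_filter.2 ⟨hpqm, hcond⟩)
      · rcases hor with ⟨rfl, rfl⟩ | ⟨rfl, rfl⟩
        · show 2 * pvD (pvKey x) (pvKey y) = _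
          rw [pvS, ← hyz, pvD_self]
          ring
        · show 2 * pvD (pvKey y) (pvKey x) = _
          rw [pvS, ← hyz, pvD_self, pvD_symm (pvKey y) (pvKey x)]
          ring
    · by_cases hxz : pvKey x = pvKey z
      · -- keys x = z ≠ y : pair candidate (key x doubled, key y)
        have h2 : 2 ≤ pvCnt (pvKey x) mbti := by
          have := hcnt (pvKey x)
          simp [List.countP_cons, hxz.symm] at this
          omega
        obtain ⟨p, q, hpq, hor⟩ := pvP2 _ (pvKey x) (pvKey y) hxM hyM hxy
        have hpqm : [p, q] ∈ PySem.List.combinations (PySem.List.dedup (mbti.map pvKey)) 2 :=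
          (PySem.List.mem_combinations_iff _ _ _).2 ⟨hpq, rfl⟩
        have hcond : pvPairCond (pvCounts mbti) [p, q] = true := by
          rw [pvPairCond_iff]
          rcases hor with ⟨rfl, rfl⟩ | ⟨rfl, rfl⟩
          · exact Or.inl h2
          · exact Or.inr h2
        refine ⟨pvPairVal [p, q], List.mem_append.2 (Or.inl (List.mem_append.2 (Or.inr ?_))), ?_⟩
        · exact List.mem_map_of_mem (List.mem_filter.2 ⟨hpqm, hcond⟩)
        · rcases hor with ⟨rfl, rfl⟩ | ⟨rfl, rfl⟩
          · show 2 * pvD (pvKey x) (pvKey y) = _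
            rw [pvS, ← hxz, pvD_self, pvD_symm (pvKey y) (pvKey x)]
            ring
          · show 2 * pvD (pvKey y) (pvKey x) = _
            rw [pvS, ← hxz, pvD_self, pvD_symm (pvKey y) (pvKey x)]
            ring
      · -- three distinct keys: a triple candidate
        obtain ⟨p, q, r, hpqr, hval⟩ :=
          pvP3 _ (pvKey x) (pvKey y) (pvKey z) hxM hyM hzM hxy hxz hyz
        have hm : [p, q, r] ∈ PySem.List.combinations (PySem.List.dedup (mbti.map pvKey)) 3 :=
          (PySem.List.mem_combinations_iff _ _ _).2 ⟨hpqr, rfl⟩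
        refine ⟨pvTripVal [p, q, r], List.mem_append.2 (Or.inr (List.mem_map_of_mem hm)), ?_⟩
        show pvD p q + pvD q r + pvD p r = _
        have : pvS p q r = pvS (pvKey x) (pvKey y) (pvKey z) := hval
        rw [pvS, pvS] at this
        exact this

theorem pvA_eq (n : Int) (mbti : List String) (h : ¬ 32 < n) :
    mbti_distance n mbti = ((PySem.List.combinations mbti 3).map pvAVal).foldl min 100 := by
  unfold mbti_distance
  rw [if_neg h, List.foldl_map]
  apply PySem.List.foldl_congr_mem
  intro md c hc
  have hlen : c.length = 3 := ((PySem.List.mem_combinations_iff mbti 3 c).1 hc).2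
  rcases c with _ | ⟨i, c⟩
  · simp at hlen
  rcases c with _ | ⟨j, c⟩
  · simp at hlen
  rcases c with _ | ⟨k, c⟩
  · simp at hlen
  rcases c with _ | ⟨d, c⟩
  · show (if md > pvCntA i j k then pvCntA i j k else md) = min md (pvAVal [i, j, k])
    rw [min_def]
    show _ = if md ≤ pvCntA i j k then md else pvCntA i j k
    split_ifs <;> omega
  · simp only [List.length_cons] at hlen; omega

theorem pvAlt_eq (n : Int) (mbti : List String) (h : ¬ 32 < n) :
    mbti_distance_alt n mbti = (pvCands mbti).foldl min 100 := by
  unfold mbti_distance_alt pvCands pvCounts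
  rw [if_neg h]

-- ===== VERDICT (by name: the statement is the Claim_ definition above) =====
theorem mbti_distance_spec : Claim_equal_mbti_distance := by
  intro n mbti _ hpre
  unfold Spec_mbti_distance
  by_cases h32 : n > 32
  · unfold mbti_distance mbti_distance_alt
    rw [if_pos h32, if_pos h32]
  · rw [pvA_eq n mbti h32, pvAlt_eq n mbti h32]
    rcases hpre with h | hlen | hall
    · exact absurd h h32
    · -- fewer than three strings: no triple exists on either side
      have hA : PySem.List.combinations mbti 3 = [] := by
        apply PySem.List.combinations_eq_nil_of_length_lt
        exact_mod_cast hlen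
      have hB : pvCands mbti = [] := by
        rcases hq : pvCands mbti with _ | ⟨v, t⟩
        · rfl
        · exfalso
          have hv : v ∈ pvCands mbti := by rw [hq]; exact List.mem_cons_self
          obtain ⟨x, y, z, hsub, _⟩ := pvCandToTriple mbti v hv
          have h3 := hsub.length_le
          simp only [List.length_cons, List.length_nil] at h3
          omega
      rw [hA, hB]
      rfl
    · -- all strings have length ≥ 4
      apply foldl_min_eq_of
      · intro v hv
        obtain ⟨c, hc, rfl⟩ := List.mem_map.1 hv
        obtain ⟨hsub, hlen⟩ := (PySem.List.mem_combinations_iff mbti 3 c).1 hc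
        rcases c with _ | ⟨i, c⟩
        · simp at hlen
        rcases c with _ | ⟨j, c⟩
        · simp at hlen
        rcases c with _ | ⟨k, c⟩
        · simp at hlen
        rcases c with _ | ⟨d, c⟩
        · obtain ⟨w, hw, hweq⟩ := pvTripleToCand mbti i j k hsub
          refine ⟨w, hw, ?_⟩
          have hi := hall i (hsub.subset (by simp))
          have hj := hall j (hsub.subset (by simp))
          have hk := hall k (hsub.subset (by simp))
          rw [hweq]
          show pvS (pvKey i) (pvKey j) (pvKey k) ≤ pvAVal [i, j, k]
          rw [show pvAVal [i, j, k] = pvCntA i j k from rfl, pvCntA_eq_S i j k hi hj hk]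
        · simp only [List.length_cons] at hlen; omega
      · intro w hw
        obtain ⟨x, y, z, hsub, hval⟩ := pvCandToTriple mbti w hw
        have hc : [x, y, z] ∈ PySem.List.combinations mbti 3 :=
          (PySem.List.mem_combinations_iff mbti 3 _).2 ⟨hsub, rfl⟩
        refine ⟨pvAVal [x, y, z], List.mem_map_of_mem hc, ?_⟩
        have hx := hall x (hsub.subset (by simp))
        have hy := hall y (hsub.subset (by simp))
        have hz := hall z (hsub.subset (by simp))
        rw [show pvAVal [x, y, z] = pvCntA x y z from rfl, pvCntA_eq_S x y z hx hy hz, hval]
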